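-- pv_equiv track=rewrite | github.com/MrBrantCode/unitest_baseline | mut_generate/mist_train_taco/taco_692/solution.py | highest_occurring_digit_in_primes
-- ===== SOURCE A (Python) =====
-- def is_prime(n):
--     if n == 1:
--         return False
--     for i in range(2, int(n ** 0.5) + 1):
--         if n % i == 0:
--             return False
--     return True
--
-- def highest_occurring_digit_in_primes(L, R):
--     prime_digits = []
--
--     for i in range(L, R + 1):
--         if is_prime(i):
--             c = i
--             while c != 0:
--                 prime_digits.append(c % 10)
--                 c = c // 10
--
--     if not prime_digits:
--         return -1
--
--     digit_count = {}
--     for digit in prime_digits: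
--         if digit in digit_count:
--             digit_count[digit] += 1
--         else:
--             digit_count[digit] = 1
--
--     max_count = 0
--     max_digit = -1
--
--     for digit, count in digit_count.items():
--         if count > max_count or (count == max_count and digit > max_digit):
--             max_count = count
--             max_digit = digit
--
--     return max_digit
-- ===== SOURCE B (Python) =====
-- def highest_occurring_digit_in_primes(L, R):
--     lo = L if L > 2 else 2
--     n = R - lo + 1
--     if n < 0:
--         n = 0
--     composite = [False] * n
--     d = 2
--     while d * d <= R:
--         q0 = lo // d + (1 if lo % d else 0)
--         if q0 < 2:
--             q0 = 2
--         for q in range(q0, R // d + 1):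
--             composite[d * q - lo] = True
--         d += 1
--     counts = [0] * 10
--     for p in range(lo, R + 1):
--         if not composite[p - lo]:
--             c = p
--             while c:
--                 counts[c % 10] += 1
--                 c //= 10
--     best_count = 0
--     best_digit = -1
--     for g in range(9, -1, -1):
--         if counts[g] > best_count:
--             best_count = counts[g]
--             best_digit = g
--     return best_digit
-- ===== Notes on version B (the rewrite author's own statement) =====
-- stated objective: faster
-- what changed: Per-number trial division plus a digit list and a dict counter is replaced by a segmented sieve marking composites of [max(L,2),R] in one set, a fixed 10-slot digit counter, and a single descending scan of digits 9..0 for the tie-to-largest argmax.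
-- crash fix: On inputs with L < 0 and L <= R, A raises TypeError (int() of the complex value (negative)**0.5); B returns the highest occurring digit among the primes in [2,R], since negative numbers are not prime. — e.g. on highest_occurring_digit_in_primes(-5, 10): A raises TypeError, B returns 7
import Mathlib
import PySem

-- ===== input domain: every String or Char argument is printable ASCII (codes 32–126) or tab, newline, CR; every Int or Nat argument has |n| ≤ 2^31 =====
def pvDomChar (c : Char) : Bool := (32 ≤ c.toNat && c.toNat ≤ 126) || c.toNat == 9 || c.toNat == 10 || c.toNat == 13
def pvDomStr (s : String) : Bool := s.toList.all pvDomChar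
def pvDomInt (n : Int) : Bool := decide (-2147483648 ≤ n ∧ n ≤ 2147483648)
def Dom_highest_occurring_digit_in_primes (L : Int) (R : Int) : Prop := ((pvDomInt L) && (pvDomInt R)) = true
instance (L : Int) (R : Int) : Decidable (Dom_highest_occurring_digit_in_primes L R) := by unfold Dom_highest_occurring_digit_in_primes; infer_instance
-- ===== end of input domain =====

-- B replaces A's per-number trial division + digit list + dict counter by a segmented sieve over
-- [max(L,2), R], a fixed 10-slot digit counter and one descending argmax scan (objective: faster).

-- ===== PORT A =====
-- `int(n ** 0.5)` is `Nat.sqrt` on every n the claims reach (0 ≤ n ≤ 2^31).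
def is_prime (n : Int) : Bool :=
  if n = 1 then false
  else if (PySem.List.pyRange 2 ((Nat.sqrt n.toNat : Int) + 1) 1).any
            (fun i => decide (PySem.Int.mod n i = 0)) then false
  else true

-- A's inner `while c != 0: append c % 10; c = c // 10` loop; on every input A accepts (Pre_) c ≥ 0,
-- so the guard `c != 0` is `0 < c`.
-- (structural fuel recursion: c.toNat steps always suffice since c // 10 < c; digitsOf_unfold below)
def digitsOfF : Nat → Int → List Int
  | 0, _ => []
  | f + 1, c =>
    if 0 < c then PySem.Int.mod c 10 :: digitsOfF f (PySem.Int.floordiv c 10) else []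
def digitsOf (c : Int) : List Int := digitsOfF c.toNat c

-- the body of A's final `for digit, count in digit_count.items()` loop
def astep (b : Int × Int) (p : Int × Int) : Int × Int :=
  if p.2 > b.1 ∨ (p.2 = b.1 ∧ p.1 > b.2) then (p.2, p.1) else b

def highest_occurring_digit_in_primes (L : Int) (R : Int) : Int :=
  let prime_digits := (PySem.List.pyRange L (R + 1) 1).foldl
      (fun acc i => if is_prime i then acc ++ digitsOf i else acc) []
  if prime_digits = [] then -1
  else
    let digit_count := prime_digits.foldl
      (fun d dgt => if d.contains dgt then d.insert dgt (d.getD dgt 0 + 1) else d.insert dgt 1)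
      (PySem.Dict.empty : PySem.Dict Int Int)
    (digit_count.items.foldl astep (0, -1)).2

-- ===== PORT B =====
-- first multiple index to mark for divisor e: max(ceil(lo / e), 2)
def qstart (lo e : Int) : Int :=
  let q0 := PySem.Int.floordiv lo e + (if PySem.Int.mod lo e ≠ 0 then 1 else 0)
  if q0 < 2 then 2 else q0

-- B's inner `for q in range(q0, R // d + 1): composite[d * q - lo] = True` loop.
-- In Python the index d*q - lo is always in range; the size guard only totalises the Lean term.
def sieveInner (R d lo : Int) (arr : Array Bool) : Array Bool :=
  (PySem.List.pyRange (qstart lo d) (PySem.Int.floordiv R d + 1) 1).foldl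
    (fun arr q =>
      if h : (d * q - lo).toNat < arr.size then arr.set (d * q - lo).toNat true h else arr) arr

-- B's outer `while d * d <= R` loop
-- (structural fuel recursion: (R + 2 - d).toNat steps always suffice; sieveLoop_unfold below)
def sieveLoopF : Nat → Int → Int → Int → Array Bool → Array Bool
  | 0, _, _, _, arr => arr
  | f + 1, R, lo, d, arr =>
    if d * d ≤ R then sieveLoopF f R lo (d + 1) (sieveInner R d lo arr) else arr
def sieveLoop (R lo d : Int) (arr : Array Bool) : Array Bool :=
  sieveLoopF (R + 2 - d).toNat R lo d arr

-- B's `while c: counts[c % 10] += 1; c //= 10` loop (c stays ≥ 0, guard is 0 < c)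
-- (structural fuel recursion: c.toNat steps always suffice; bumpDigits_unfold below)
def bumpDigitsF : Nat → Int → List Int → List Int
  | 0, _, counts => counts
  | f + 1, c, counts =>
    if 0 < c then
      bumpDigitsF f (PySem.Int.floordiv c 10)
        (PySem.List.pySetD counts (PySem.Int.mod c 10)
          (PySem.List.pyGetD counts (PySem.Int.mod c 10) 0 + 1))
    else counts
def bumpDigits (c : Int) (counts : List Int) : List Int := bumpDigitsF c.toNat c counts

-- the body of B's final `for g in range(9, -1, -1)` scan
def bstep (counts : List Int) (b : Int × Int) (g : Int) : Int × Int :=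
  if PySem.List.pyGetD counts g 0 > b.1 then (PySem.List.pyGetD counts g 0, g) else b

def highest_occurring_digit_in_primes_alt (L : Int) (R : Int) : Int :=
  let lo := max L 2
  let composite := sieveLoop R lo 2 (Array.replicate (R - lo + 1).toNat false)
  let counts := (PySem.List.pyRange lo (R + 1) 1).foldl
      (fun counts p =>
        if ¬ (composite.getD (p - lo).toNat false) then bumpDigits p counts else counts)
      (List.replicate 10 (0 : Int))
  ((PySem.List.pyRange 9 (-1) (-1)).foldl (bstep counts) (0, -1)).2

-- ===== PRECONDITION & SPEC =====
-- Pre_ excludes exactly the inputs where A raises: with L < 0 and L ≤ R, `i ** 0.5` is evaluated at a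
-- negative i, yielding a complex number on which int() raises TypeError.
def Pre_highest_occurring_digit_in_primes (L : Int) (R : Int) : Prop := 0 ≤ L ∨ R < L
instance (L : Int) (R : Int) : Decidable (Pre_highest_occurring_digit_in_primes L R) := by
  unfold Pre_highest_occurring_digit_in_primes; infer_instance

def pvWitness_highest_occurring_digit_in_primes : Int × Int := (2, 10)

-- On inputs with L < 0 and L ≤ R, A raises TypeError (int() of the complex (negative)**0.5);
-- B returns the highest occurring digit among the primes in [2, R] — negative numbers are not prime.
def Raises_highest_occurring_digit_in_primes (L : Int) (R : Int) : Prop := L < 0 ∧ L ≤ R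
instance (L : Int) (R : Int) : Decidable (Raises_highest_occurring_digit_in_primes L R) := by
  unfold Raises_highest_occurring_digit_in_primes; infer_instance
def pvRaiseWitness_highest_occurring_digit_in_primes : Int × Int := (-5, 10)
def pvRaiseWitnessOut_highest_occurring_digit_in_primes : Int := 7

def Spec_highest_occurring_digit_in_primes (L : Int) (R : Int) (out : Int) : Prop :=
  out = highest_occurring_digit_in_primes_alt L R
instance (L : Int) (R : Int) (out : Int) : Decidable (Spec_highest_occurring_digit_in_primes L R out) := by
  unfold Spec_highest_occurring_digit_in_primes; infer_instance

-- ===== CLAIM (what is proved, stated in full; the proofs are below) =====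
def Claim_equal_highest_occurring_digit_in_primes : Prop :=
  ∀ (L : Int) (R : Int), Dom_highest_occurring_digit_in_primes L R →
    Pre_highest_occurring_digit_in_primes L R →
    Spec_highest_occurring_digit_in_primes L R (highest_occurring_digit_in_primes L R)

def Claim_raises_highest_occurring_digit_in_primes : Prop :=
  (∀ (L : Int) (R : Int), Dom_highest_occurring_digit_in_primes L R →
      Raises_highest_occurring_digit_in_primes L R → ¬ Pre_highest_occurring_digit_in_primes L R) ∧
  (Dom_highest_occurring_digit_in_primes (pvRaiseWitness_highest_occurring_digit_in_primes.1) (pvRaiseWitness_highest_occurring_digit_in_primes.2) ∧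
   Raises_highest_occurring_digit_in_primes (pvRaiseWitness_highest_occurring_digit_in_primes.1) (pvRaiseWitness_highest_occurring_digit_in_primes.2) ∧
   highest_occurring_digit_in_primes_alt (pvRaiseWitness_highest_occurring_digit_in_primes.1) (pvRaiseWitness_highest_occurring_digit_in_primes.2) = pvRaiseWitnessOut_highest_occurring_digit_in_primes)

-- ===== LEMMAS AND PROOFS =====

lemma digitsOfF_congr : ∀ (f g : Nat) (c : Int), c.toNat ≤ f → c.toNat ≤ g →
    digitsOfF f c = digitsOfF g c := by
  intro f
  induction f with
  | zero =>
    intro g c hf _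
    cases g with
    | zero => rfl
    | succ g => simp only [digitsOfF]; rw [if_neg (by omega)]
  | succ f ih =>
    intro g c hf hg
    cases g with
    | zero => simp only [digitsOfF]; rw [if_neg (by omega)]
    | succ g =>
      simp only [digitsOfF]
      by_cases h : 0 < c
      · rw [if_pos h, if_pos h]
        have hq : (PySem.Int.floordiv c 10).toNat ≤ f ∧ (PySem.Int.floordiv c 10).toNat ≤ g := by
          rw [PySem.Int.floordiv_eq_ediv_of_pos (by norm_num)]; omega
        rw [ih g _ hq.1 hq.2]
      · rw [if_neg h, if_neg h]

lemma digitsOf_unfold (c : Int) :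
    digitsOf c = if 0 < c then PySem.Int.mod c 10 :: digitsOf (PySem.Int.floordiv c 10) else [] := by
  by_cases h : 0 < c
  · rw [if_pos h]
    have hk : c.toNat = (c.toNat - 1) + 1 := by omega
    rw [digitsOf, hk]
    simp only [digitsOfF]
    rw [if_pos h, digitsOf]
    congr 1
    apply digitsOfF_congr
    · rw [PySem.Int.floordiv_eq_ediv_of_pos (by norm_num)]; omega
    · exact le_refl _
  · rw [if_neg h, digitsOf]
    have : c.toNat = 0 := by omega
    rw [this]; rfl

lemma bumpDigitsF_congr : ∀ (f g : Nat) (c : Int) (counts : List Int), c.toNat ≤ f → c.toNat ≤ g →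
    bumpDigitsF f c counts = bumpDigitsF g c counts := by
  intro f
  induction f with
  | zero =>
    intro g c counts hf _
    cases g with
    | zero => rfl
    | succ g => simp only [bumpDigitsF]; rw [if_neg (by omega)]
  | succ f ih =>
    intro g c counts hf hg
    cases g with
    | zero => simp only [bumpDigitsF]; rw [if_neg (by omega)]
    | succ g =>
      simp only [bumpDigitsF]
      by_cases h : 0 < c
      · rw [if_pos h, if_pos h]
        have hq : (PySem.Int.floordiv c 10).toNat ≤ f ∧ (PySem.Int.floordiv c 10).toNat ≤ g := by
          rw [PySem.Int.floordiv_eq_ediv_of_pos (by norm_num)]; omega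
        rw [ih g _ _ hq.1 hq.2]
      · rw [if_neg h, if_neg h]

lemma bumpDigits_unfold (c : Int) (counts : List Int) :
    bumpDigits c counts = if 0 < c then
      bumpDigits (PySem.Int.floordiv c 10)
        (PySem.List.pySetD counts (PySem.Int.mod c 10)
          (PySem.List.pyGetD counts (PySem.Int.mod c 10) 0 + 1))
    else counts := by
  by_cases h : 0 < c
  · rw [if_pos h]
    have hk : c.toNat = (c.toNat - 1) + 1 := by omega
    rw [bumpDigits, hk]
    simp only [bumpDigitsF]
    rw [if_pos h, bumpDigits]
    apply bumpDigitsF_congr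
    · rw [PySem.Int.floordiv_eq_ediv_of_pos (by norm_num)]; omega
    · exact le_refl _
  · rw [if_neg h, bumpDigits]
    have : c.toNat = 0 := by omega
    rw [this]; rfl

lemma sieveLoopF_congr : ∀ (f g : Nat) (R lo d : Int) (s : Array Bool),
    (R + 2 - d).toNat ≤ f → (R + 2 - d).toNat ≤ g →
    sieveLoopF f R lo d s = sieveLoopF g R lo d s := by
  intro f
  induction f with
  | zero =>
    intro g R lo d s hf _
    cases g with
    | zero => rfl
    | succ g =>
      simp only [sieveLoopF]
      rw [if_neg ?_]
      intro hdd
      have h1 : d ≤ d * d ∨ d ≤ 0 := by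
        rcases (by omega : 1 ≤ d ∨ d < 1) with h | h
        · left; nlinarith
        · right; omega
      have h0 : (0 : Int) ≤ d * d := mul_self_nonneg d
      omega
  | succ f ih =>
    intro g R lo d s hf hg
    cases g with
    | zero =>
      simp only [sieveLoopF]
      rw [if_neg ?_]
      intro hdd
      have h1 : d ≤ d * d ∨ d ≤ 0 := by
        rcases (by omega : 1 ≤ d ∨ d < 1) with h | h
        · left; nlinarith
        · right; omega
      have h0 : (0 : Int) ≤ d * d := mul_self_nonneg d
      omega
    | succ g =>
      simp only [sieveLoopF]
      by_cases h : d * d ≤ R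
      · rw [if_pos h, if_pos h]
        have h1 : d ≤ d * d ∨ d ≤ 0 := by
          rcases (by omega : 1 ≤ d ∨ d < 1) with h' | h'
          · left; nlinarith
          · right; omega
        have h0 : (0 : Int) ≤ d * d := mul_self_nonneg d
        exact ih g R lo (d + 1) _ (by omega) (by omega)
      · rw [if_neg h, if_neg h]

lemma sieveLoop_unfold (R lo d : Int) (s : Array Bool) :
    sieveLoop R lo d s = if d * d ≤ R then sieveLoop R lo (d + 1) (sieveInner R d lo s) else s := by
  by_cases h : d * d ≤ R
  · rw [if_pos h]
    have h1 : d ≤ d * d ∨ d ≤ 0 := by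
      rcases (by omega : 1 ≤ d ∨ d < 1) with h' | h'
      · left; nlinarith
      · right; omega
    have h0 : (0 : Int) ≤ d * d := mul_self_nonneg d
    have hk : (R + 2 - d).toNat = ((R + 2 - d).toNat - 1) + 1 := by omega
    rw [sieveLoop, hk]
    simp only [sieveLoopF]
    rw [if_pos h, sieveLoop]
    apply sieveLoopF_congr
    · omega
    · exact le_refl _
  · rw [if_neg h, sieveLoop]
    rcases Nat.eq_zero_or_pos (R + 2 - d).toNat with h0 | h0
    · rw [h0]; rfl
    · have hk : (R + 2 - d).toNat = ((R + 2 - d).toNat - 1) + 1 := by omega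
      rw [hk]; simp only [sieveLoopF]; rw [if_neg h]

-- digits are in [0, 10)
lemma mem_digitsOf {c g : Int} (hg : g ∈ digitsOf c) : 0 ≤ g ∧ g < 10 := by
  have H : ∀ (n : Nat) (c : Int), c.toNat = n → g ∈ digitsOf c → 0 ≤ g ∧ g < 10 := by
    intro n
    induction n using Nat.strong_induction_on with
    | _ n ih =>
      intro c hn hg
      rw [digitsOf_unfold] at hg
      by_cases h : 0 < c
      · rw [if_pos h] at hg
        rcases List.mem_cons.mp hg with h1 | h1
        · subst h1
          constructor
          · exact PySem.Int.mod_nonneg c (by norm_num)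
          · exact PySem.Int.mod_lt c (by norm_num)
        · have hlt : (PySem.Int.floordiv c 10).toNat < n := by
            rw [PySem.Int.floordiv_eq_ediv_of_pos (by norm_num)]; omega
          exact ih _ hlt _ rfl h1
      · rw [if_neg h] at hg; simp at hg
  exact H c.toNat c rfl hg

-- trial division to sqrt decides primality
lemma is_prime_iff {n : Int} (hn : 2 ≤ n) : is_prime n = true ↔ Nat.Prime n.toNat := by
  have hne : n ≠ 1 := by omega
  have hcast : (n.toNat : Int) = n := Int.toNat_of_nonneg (by omega)
  rw [is_prime, if_neg hne]
  have hb : ∀ b : Bool, (if b then false else true) = !b := by intro b; cases b <;> rfl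
  rw [hb, Bool.not_eq_eq_eq_not, Bool.not_true]
  rw [List.any_eq_false]
  have key : (∀ i ∈ PySem.List.pyRange 2 ((Nat.sqrt n.toNat : Int) + 1) 1,
      ¬ (decide (PySem.Int.mod n i = 0)) = true) ↔
      ∀ i : Int, 2 ≤ i → i ≤ (Nat.sqrt n.toNat : Int) → ¬ (i ∣ n) := by
    constructor
    · intro h i h2 hle hdvd
      have := h i (by rw [PySem.List.mem_pyRange_one]; omega)
      rw [decide_eq_true_eq, PySem.Int.mod_eq_zero_iff_dvd] at this
      exact this hdvd
    · intro h i hi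
      rw [PySem.List.mem_pyRange_one] at hi
      rw [decide_eq_true_eq, PySem.Int.mod_eq_zero_iff_dvd]
      exact h i hi.1 (by omega)
  rw [key]
  constructor
  · intro h
    by_contra hp
    have hfp : (n.toNat).minFac.Prime := Nat.minFac_prime (by omega)
    have hf2 : 2 ≤ (n.toNat).minFac := hfp.two_le
    have hsq : (n.toNat).minFac ^ 2 ≤ n.toNat := Nat.minFac_sq_le_self (by omega) hp
    have hle : (n.toNat).minFac ≤ Nat.sqrt n.toNat := by
      rw [Nat.le_sqrt]; nlinarith
    have hdvd : ((n.toNat).minFac : Int) ∣ n := by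
      rw [← hcast]; exact_mod_cast Int.natCast_dvd_natCast.mpr (Nat.minFac_dvd n.toNat)
    exact h ((n.toNat).minFac : Int) (by exact_mod_cast hf2) (by exact_mod_cast hle) hdvd
  · intro hp i h2 hle hdvd
    have hi0 : 0 ≤ i := by omega
    have hdvd' : i.toNat ∣ n.toNat := by
      rw [← Int.natCast_dvd_natCast, Int.toNat_of_nonneg hi0, hcast]; exact hdvd
    rcases (Nat.Prime.eq_one_or_self_of_dvd hp i.toNat hdvd') with h1 | h1
    · omega
    · have hlt : Nat.sqrt n.toNat < n.toNat := Nat.sqrt_lt_self (by omega)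
      omega

-- a set index (a.set) read back through getD
lemma getD_set_bool (a : Array Bool) (i : Nat) (h : i < a.size) (j : Nat) (v d : Bool) :
    (a.set i v h).getD j d = if j = i then v else a.getD j d := by
  simp only [Array.getD_eq_getD_getElem?, Array.getElem?_set]
  by_cases hij : i = j
  · rw [if_pos hij, if_pos hij.symm]; rfl
  · rw [if_neg hij, if_neg (fun hh => hij hh.symm)]

-- the inner marking loop preserves the array size
lemma markFold_size (d lo : Int) : ∀ (l : List Int) (arr : Array Bool),
    (l.foldl (fun arr q =>
      if h : (d * q - lo).toNat < arr.size then arr.set (d * q - lo).toNat true h else arr)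
      arr).size = arr.size := by
  intro l
  induction l with
  | nil => intro arr; rfl
  | cons q t ih =>
    intro arr
    rw [List.foldl_cons]
    by_cases h : (d * q - lo).toNat < arr.size
    · rw [dif_pos h, ih, Array.size_set]
    · rw [dif_neg h, ih]

lemma sieveInner_size (R d lo : Int) (arr : Array Bool) :
    (sieveInner R d lo arr).size = arr.size := markFold_size d lo _ arr

-- which flags the inner marking loop sets
lemma markFold_flag (d lo : Int) (j : Nat) : ∀ (l : List Int) (arr : Array Bool),
    ((l.foldl (fun arr q =>
        if h : (d * q - lo).toNat < arr.size then arr.set (d * q - lo).toNat true h else arr)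
        arr).getD j false = true ↔
      arr.getD j false = true ∨
        ∃ q ∈ l, (d * q - lo).toNat = j ∧ (d * q - lo).toNat < arr.size) := by
  intro l
  induction l with
  | nil => intro arr; simp
  | cons q t ih =>
    intro arr
    rw [List.foldl_cons]
    by_cases h : (d * q - lo).toNat < arr.size
    · rw [dif_pos h, ih, Array.size_set, getD_set_bool]
      constructor
      · rintro (hget | ⟨q', hq', hj, hjs⟩)
        · by_cases hj : j = (d * q - lo).toNat
          · exact Or.inr ⟨q, List.mem_cons_self, hj.symm, by omega⟩
          · rw [if_neg hj] at hget
            exact Or.inl hget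
        · exact Or.inr ⟨q', List.mem_cons_of_mem _ hq', hj, hjs⟩
      · rintro (hget | ⟨q', hq', hj, hjs⟩)
        · left
          by_cases hj : j = (d * q - lo).toNat
          · rw [if_pos hj]
          · rw [if_neg hj]; exact hget
        · rcases List.mem_cons.mp hq' with rfl | hq'
          · left; rw [if_pos (by omega)]
          · exact Or.inr ⟨q', hq', hj, hjs⟩
    · rw [dif_neg h, ih]
      constructor
      · rintro (hget | ⟨q', hq', hj, hjs⟩)
        · exact Or.inl hget
        · exact Or.inr ⟨q', List.mem_cons_of_mem _ hq', hj, hjs⟩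
      · rintro (hget | ⟨q', hq', hj, hjs⟩)
        · exact Or.inl hget
        · rcases List.mem_cons.mp hq' with rfl | hq'
          · omega
          · exact Or.inr ⟨q', hq', hj, hjs⟩

lemma qstart_le {lo e q : Int} (he : 0 < e) (h2 : 2 ≤ q) (hq : lo ≤ e * q) : qstart lo e ≤ q := by
  have hmod := PySem.Int.floordiv_mul_add_mod lo e
  have hm0 : 0 ≤ PySem.Int.mod lo e := PySem.Int.mod_nonneg lo he
  have hml : PySem.Int.mod lo e < e := PySem.Int.mod_lt lo he
  have hF1 : PySem.Int.floordiv lo e ≤ q := by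
    by_contra hc
    have hc' : q + 1 ≤ PySem.Int.floordiv lo e := by omega
    have h1 : e * (q + 1) ≤ e * PySem.Int.floordiv lo e :=
      mul_le_mul_of_nonneg_left hc' he.le
    nlinarith
  have hF2 : PySem.Int.mod lo e ≠ 0 → PySem.Int.floordiv lo e < q := by
    intro hm
    by_contra hc
    have hc' : q ≤ PySem.Int.floordiv lo e := by omega
    have hm1 : 1 ≤ PySem.Int.mod lo e := by omega
    have h1 : e * q ≤ PySem.Int.floordiv lo e * e := by
      rw [mul_comm (PySem.Int.floordiv lo e) e]
      exact mul_le_mul_of_nonneg_left hc' he.le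
    linarith
  unfold qstart
  dsimp only
  split_ifs <;> omega

lemma two_le_qstart (lo e : Int) : 2 ≤ qstart lo e := by
  unfold qstart
  dsimp only
  split_ifs <;> omega

-- a marked multiple is at least lo
lemma lo_le_of_qstart {lo e q : Int} (he : 0 < e) (hq : qstart lo e ≤ q) : lo ≤ e * q := by
  have hmod := PySem.Int.floordiv_mul_add_mod lo e
  have hm0 : 0 ≤ PySem.Int.mod lo e := PySem.Int.mod_nonneg lo he
  have hml : PySem.Int.mod lo e < e := PySem.Int.mod_lt lo he
  by_cases hm : PySem.Int.mod lo e ≠ 0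
  · have hq0 : PySem.Int.floordiv lo e + 1 ≤ q := by
      unfold qstart at hq
      dsimp only at hq
      rw [if_pos hm] at hq
      split_ifs at hq <;> omega
    have h1 : e * (PySem.Int.floordiv lo e + 1) ≤ e * q := mul_le_mul_of_nonneg_left hq0 he.le
    nlinarith
  · have hm' : PySem.Int.mod lo e = 0 := by omega
    have hq0 : PySem.Int.floordiv lo e ≤ q := by
      unfold qstart at hq
      dsimp only at hq
      rw [if_neg hm] at hq
      split_ifs at hq <;> omega
    have h1 : e * PySem.Int.floordiv lo e ≤ e * q := mul_le_mul_of_nonneg_left hq0 he.le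
    nlinarith

-- which flags the whole sieve sets
lemma sieveLoop_flag (R lo : Int) (j : Nat) : ∀ (d : Int) (arr : Array Bool), 2 ≤ d →
    ((sieveLoop R lo d arr).getD j false = true ↔
      arr.getD j false = true ∨
        ∃ e q : Int, d ≤ e ∧ e * e ≤ R ∧ qstart lo e ≤ q ∧ q < PySem.Int.floordiv R e + 1 ∧
          (e * q - lo).toNat = j ∧ (e * q - lo).toNat < arr.size) := by
  have H : ∀ (n : Nat) (d : Int), (R + 2 - d).toNat = n → ∀ arr : Array Bool, 2 ≤ d →
      ((sieveLoop R lo d arr).getD j false = true ↔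
        arr.getD j false = true ∨
          ∃ e q : Int, d ≤ e ∧ e * e ≤ R ∧ qstart lo e ≤ q ∧ q < PySem.Int.floordiv R e + 1 ∧
            (e * q - lo).toNat = j ∧ (e * q - lo).toNat < arr.size) := by
    intro n
    induction n using Nat.strong_induction_on with
    | _ n ih =>
      intro d hn arr hd
      rw [sieveLoop_unfold]
      by_cases h : d * d ≤ R
      · rw [if_pos h]
        have hdd : d ≤ d * d := by nlinarith
        have hrec := ih (R + 2 - (d + 1)).toNat (by omega) (d + 1) rfl (sieveInner R d lo arr)
          (by omega)
        rw [hrec, sieveInner_size]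
        have hinner : (sieveInner R d lo arr).getD j false = true ↔
            arr.getD j false = true ∨
              ∃ q, (qstart lo d ≤ q ∧ q < PySem.Int.floordiv R d + 1) ∧
                (d * q - lo).toNat = j ∧ (d * q - lo).toNat < arr.size := by
          rw [sieveInner, markFold_flag]
          simp only [PySem.List.mem_pyRange_one]
        rw [hinner]
        constructor
        · rintro ((hget | ⟨q, hq, hj, hjs⟩) | ⟨e, q, h1, h2, h3, h4, h5, h6⟩)
          · exact Or.inl hget
          · exact Or.inr ⟨d, q, le_refl d, h, hq.1, hq.2, hj, hjs⟩
          · exact Or.inr ⟨e, q, by omega, h2, h3, h4, h5, h6⟩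
        · rintro (hget | ⟨e, q, h1, h2, h3, h4, h5, h6⟩)
          · exact Or.inl (Or.inl hget)
          · rcases (by omega : e = d ∨ d + 1 ≤ e) with rfl | he
            · exact Or.inl (Or.inr ⟨q, ⟨h3, h4⟩, h5, h6⟩)
            · exact Or.inr ⟨e, q, he, h2, h3, h4, h5, h6⟩
      · rw [if_neg h]
        constructor
        · exact Or.inl
        · rintro (hget | ⟨e, q, h1, h2, h3, h4, h5, h6⟩)
          · exact hget
          · exfalso
            have : d * d ≤ e * e := by nlinarith
            omega
  intro d arr hd
  exact H (R + 2 - d).toNat d rfl arr hd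

-- for p in [max L 2, R], the sieve flag at p - lo is set exactly when p is not prime
lemma flag_sieve_iff {L R p : Int} (hlo : max L 2 ≤ p) (hpR : p ≤ R) :
    ((sieveLoop R (max L 2) 2
        (Array.replicate (R - max L 2 + 1).toNat false)).getD (p - max L 2).toNat false = true) ↔
      ¬ Nat.Prime p.toNat := by
  have hp2 : 2 ≤ p := le_trans (le_max_right _ _) hlo
  rw [sieveLoop_flag R (max L 2) _ 2 _ (le_refl 2)]
  have hbase : (Array.replicate (R - max L 2 + 1).toNat false).getD (p - max L 2).toNat false
      = false := by
    simp only [Array.getD_eq_getD_getElem?, Array.getElem?_replicate]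
    split_ifs <;> rfl
  rw [hbase]
  simp only [Array.size_replicate, Bool.false_eq_true, false_or]
  constructor
  · rintro ⟨e, q, h2e, heR, hqs, hqR, hj, hjs⟩
    intro hp
    have he0 : (0 : Int) < e := by omega
    have hq2 : 2 ≤ q := le_trans (two_le_qstart (max L 2) e) hqs
    have hloq : max L 2 ≤ e * q := lo_le_of_qstart he0 hqs
    have hpq : e * q = p := by omega
    obtain ⟨a, rfl⟩ : ∃ a : Nat, e = (a : Int) := ⟨e.toNat, (Int.toNat_of_nonneg he0.le).symm⟩
    obtain ⟨b, rfl⟩ : ∃ b : Nat, q = (b : Int) := ⟨q.toNat, (Int.toNat_of_nonneg (by omega)).symm⟩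
    have ha2 : 2 ≤ a := by exact_mod_cast h2e
    have hb2 : 2 ≤ b := by exact_mod_cast hq2
    have hcast : ((a : Int) * (b : Int)).toNat = a * b := by
      rw [show ((a : Int) * (b : Int)) = ((a * b : Nat) : Int) by push_cast; ring, Int.toNat_natCast]
    rw [← hpq, hcast] at hp
    rcases Nat.Prime.eq_one_or_self_of_dvd hp a ⟨b, rfl⟩ with h1 | h1
    · omega
    · nlinarith
  · intro hp
    have hm2 : 2 ≤ p.toNat := by omega
    obtain ⟨f, hf⟩ : ∃ f : Nat, f = p.toNat.minFac := ⟨p.toNat.minFac, rfl⟩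
    have hfp : f.Prime := hf ▸ Nat.minFac_prime (show p.toNat ≠ 1 by omega)
    have hf2 : 2 ≤ f := hfp.two_le
    have hsq : f ^ 2 ≤ p.toNat := hf ▸ Nat.minFac_sq_le_self (by omega) hp
    obtain ⟨b, hb⟩ : f ∣ p.toNat := hf ▸ Nat.minFac_dvd p.toNat
    have hbf : f ≤ b := by nlinarith
    have hpcast : ((p.toNat : Nat) : Int) = p := Int.toNat_of_nonneg (by omega)
    have hpe : p = (f : Int) * (b : Int) := by
      rw [← hpcast, hb]; push_cast; ring
    refine ⟨(f : Int), (b : Int), by exact_mod_cast hf2, ?_, ?_, ?_, by rw [← hpe], by omega⟩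
    · have : (f : Int) * (f : Int) ≤ p := by
        rw [← hpcast]; exact_mod_cast (by nlinarith : f * f ≤ p.toNat)
      omega
    · exact qstart_le (by exact_mod_cast (by omega : 0 < f))
        (by exact_mod_cast (by omega : 2 ≤ b)) (le_trans hlo (le_of_eq hpe))
    · have hle : (b : Int) ≤ PySem.Int.floordiv R (f : Int) := by
        rw [PySem.Int.le_floordiv_iff_mul_le (by exact_mod_cast (by omega : 0 < f))]
        calc (b : Int) * (f : Int) = p := by rw [hpe]; ring
          _ ≤ R := hpR
      omega

-- bumpDigits adds the digit counts of c
lemma bumpDigits_spec {c : Int} (hc : 0 ≤ c) : ∀ counts : List Int, counts.length = 10 →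
    (bumpDigits c counts).length = 10 ∧
    ∀ g : Int, 0 ≤ g → g < 10 →
      PySem.List.pyGetD (bumpDigits c counts) g 0 =
        PySem.List.pyGetD counts g 0 + ((digitsOf c).count g : Int) := by
  have H : ∀ (n : Nat) (c : Int), c.toNat = n → 0 ≤ c → ∀ counts : List Int, counts.length = 10 →
      (bumpDigits c counts).length = 10 ∧
      ∀ g : Int, 0 ≤ g → g < 10 →
        PySem.List.pyGetD (bumpDigits c counts) g 0 =
          PySem.List.pyGetD counts g 0 + ((digitsOf c).count g : Int) := by
    intro n
    induction n using Nat.strong_induction_on with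
    | _ n ih =>
      intro c hn hc counts hlen
      by_cases h : 0 < c
      · have hm0 : 0 ≤ PySem.Int.mod c 10 := PySem.Int.mod_nonneg c (by norm_num)
        have hml : PySem.Int.mod c 10 < 10 := PySem.Int.mod_lt c (by norm_num)
        have hfd : 0 ≤ PySem.Int.floordiv c 10 ∧ (PySem.Int.floordiv c 10).toNat < n := by
          rw [PySem.Int.floordiv_eq_ediv_of_pos (by norm_num)]; omega
        set counts' := PySem.List.pySetD counts (PySem.Int.mod c 10)
          (PySem.List.pyGetD counts (PySem.Int.mod c 10) 0 + 1) with hc'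
        have hlen' : counts'.length = 10 := by
          rw [hc', PySem.List.length_pySetD, hlen]
        have IH := ih _ hfd.2 (PySem.Int.floordiv c 10) rfl hfd.1 counts' hlen'
        have hbump : bumpDigits c counts = bumpDigits (PySem.Int.floordiv c 10) counts' := by
          rw [bumpDigits_unfold, if_pos h]
        have hdig : digitsOf c = PySem.Int.mod c 10 :: digitsOf (PySem.Int.floordiv c 10) := by
          rw [digitsOf_unfold, if_pos h]
        refine ⟨by rw [hbump]; exact IH.1, ?_⟩
        intro g hg0 hg10
        rw [hbump, IH.2 g hg0 hg10, hdig]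
        have hsetget : PySem.List.pyGetD counts' g 0 =
            if g.toNat = (PySem.Int.mod c 10).toNat then
              PySem.List.pyGetD counts (PySem.Int.mod c 10) 0 + 1
            else PySem.List.pyGetD counts g 0 := by
          have hmn : PySem.Int.mod c 10 = ((PySem.Int.mod c 10).toNat : Int) :=
            (Int.toNat_of_nonneg hm0).symm
          have hgn : g = ((g.toNat : Nat) : Int) := (Int.toNat_of_nonneg hg0).symm
          rw [hc', hmn, hgn]
          exact PySem.List.pyGetD_pySetD_natCast counts _ _ _ 0 (by omega)
        rw [hsetget]
        by_cases hgm : g = PySem.Int.mod c 10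
        · rw [if_pos (by omega : g.toNat = (PySem.Int.mod c 10).toNat), List.count_cons, hgm]
          simp only [beq_self_eq_true, if_true]
          push_cast
          omega
        · rw [if_neg (by omega : ¬ g.toNat = (PySem.Int.mod c 10).toNat), List.count_cons]
          have : (PySem.Int.mod c 10 == g) = false := by
            simp only [beq_eq_false_iff_ne, ne_eq]
            exact fun hh => hgm hh.symm
          rw [this]
          push_cast
          omega
      · have hz : bumpDigits c counts = counts := by
          rw [bumpDigits_unfold, if_neg h]
        have hdz : digitsOf c = [] := by rw [digitsOf_unfold, if_neg h]
        refine ⟨by rw [hz]; exact hlen, ?_⟩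
        intro g _ _
        rw [hz, hdz]
        simp
  exact H c.toNat c rfl hc

-- the counting loop over any list
lemma countsFold_spec (pred : Int → Bool) : ∀ (l : List Int) (counts : List Int),
    (∀ p ∈ l, 0 ≤ p) → counts.length = 10 →
    (l.foldl (fun counts p => if pred p then bumpDigits p counts else counts) counts).length = 10 ∧
    ∀ g : Int, 0 ≤ g → g < 10 →
      PySem.List.pyGetD (l.foldl (fun counts p => if pred p then bumpDigits p counts else counts) counts) g 0 =
        PySem.List.pyGetD counts g 0 + ((l.flatMap (fun p => if pred p then digitsOf p else [])).count g : Int) := by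
  intro l
  induction l with
  | nil => intro counts _ hlen; exact ⟨hlen, by intro g _ _; simp⟩
  | cons p l ihl =>
    intro counts hpos hlen
    have hp0 : 0 ≤ p := hpos p (List.mem_cons_self)
    set counts1 := if pred p then bumpDigits p counts else counts with hc1
    have hlen1 : counts1.length = 10 := by
      rw [hc1]
      by_cases hp : pred p
      · rw [if_pos hp]; exact (bumpDigits_spec hp0 counts hlen).1
      · rw [if_neg hp]; exact hlen
    have IH := ihl counts1 (fun q hq => hpos q (List.mem_cons_of_mem _ hq)) hlen1
    simp only [List.foldl_cons]
    refine ⟨IH.1, ?_⟩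
    intro g hg0 hg10
    rw [IH.2 g hg0 hg10]
    have h1 : PySem.List.pyGetD counts1 g 0 =
        PySem.List.pyGetD counts g 0 + (((if pred p then digitsOf p else []).count g : Nat) : Int) := by
      rw [hc1]
      by_cases hp : pred p
      · rw [if_pos hp, if_pos hp]
        exact (bumpDigits_spec hp0 counts hlen).2 g hg0 hg10
      · rw [if_neg hp, if_neg hp]; simp
    rw [h1]
    rw [List.flatMap_cons, List.count_append]
    push_cast
    ring

-- astep is a lexicographic max step: the fold is order-independent
lemma astep_rcomm : ∀ (b : Int × Int) (p q : Int × Int), astep (astep b p) q = astep (astep b q) p := by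
  intro b p q
  unfold astep
  split_ifs <;> first
    | rfl
    | (refine Prod.ext ?_ ?_ <;> simp_all <;> omega)

-- folding astep over the (digit, count) pairs of a strictly descending digit list
-- equals B's strict descending scan
lemma fold_desc (cnt : Int → Int) (_hc : ∀ g, 0 ≤ cnt g) :
    ∀ (gs : List Int) (bc bd : Int), 0 ≤ bc → (0 < bc → ∀ g ∈ gs, g < bd) →
      gs.Pairwise (· > ·) →
      ((gs.filter (fun g => cnt g ≠ 0)).map (fun g => (g, cnt g))).foldl astep (bc, bd)
        = gs.foldl (fun b g => if cnt g > b.1 then (cnt g, g) else b) (bc, bd) := by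
  intro gs
  induction gs with
  | nil => intro bc bd _ _ _; rfl
  | cons g t ih =>
    intro bc bd hbc hinv hpw
    rcases List.pairwise_cons.mp hpw with ⟨hgt, hpt⟩
    simp only [List.filter_cons, List.foldl_cons]
    by_cases hz : cnt g = 0
    · rw [if_neg (by simp [hz])]
      have hstep : (if cnt g > bc then (cnt g, g) else (bc, bd)) = (bc, bd) := by
        rw [if_neg (by omega)]
      rw [hstep]
      exact ih bc bd hbc (fun hb g' hg' => hinv hb g' (List.mem_cons_of_mem _ hg')) hpt
    · rw [if_pos (by simp [hz]), List.map_cons, List.foldl_cons]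
      by_cases hgtc : cnt g > bc
      · have ha : astep (bc, bd) (g, cnt g) = (cnt g, g) := by
          unfold astep; rw [if_pos (Or.inl hgtc)]
        have hb : (if cnt g > bc then (cnt g, g) else (bc, bd)) = (cnt g, g) := if_pos hgtc
        rw [ha, hb]
        exact ih (cnt g) g (by omega) (fun _ g' hg' => hgt g' hg') hpt
      · have hnd : ¬ (cnt g > bc ∨ (cnt g = bc ∧ g > bd)) := by
          rintro (h | ⟨h1, h2⟩)
          · exact hgtc h
          · have hbc0 : 0 < bc := by omega
            exact absurd h2 (by have := hinv hbc0 g (List.mem_cons_self); omega)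
        have ha : astep (bc, bd) (g, cnt g) = (bc, bd) := by
          unfold astep; rw [if_neg hnd]
        have hb : (if cnt g > bc then (cnt g, g) else (bc, bd)) = (bc, bd) := if_neg hgtc
        rw [ha, hb]
        exact ih bc bd hbc (fun hb g' hg' => hinv hb g' (List.mem_cons_of_mem _ hg')) hpt

lemma flatMap_congr_mem {α β : Type} {l : List α} {f g : α → List β}
    (h : ∀ x ∈ l, f x = g x) : l.flatMap f = l.flatMap g := by
  induction l with
  | nil => rfl
  | cons a t ih =>
    simp [List.flatMap_cons, h a List.mem_cons_self,
      ih (fun x hx => h x (List.mem_cons_of_mem _ hx))]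

-- ===== VERDICT (by name: the statement is the Claim_ definition above) =====
theorem highest_occurring_digit_in_primes_spec : Claim_equal_highest_occurring_digit_in_primes := by
  intro L R _ hpre
  unfold Pre_highest_occurring_digit_in_primes at hpre
  unfold Spec_highest_occurring_digit_in_primes
  -- names for the shared pieces
  have hlo2 : (2 : Int) ≤ max L 2 := le_max_right _ _
  set lo := max L 2 with hlo
  set composite := sieveLoop R lo 2 (Array.replicate (R - lo + 1).toNat false) with hcomp
  set F : Int → List Int := fun i => if is_prime i then digitsOf i else [] with hF
  set pd : List Int := (PySem.List.pyRange lo (R + 1) 1).flatMap F with hpd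
  set cnt : Int → Int := fun g => ((pd.count g : Nat) : Int) with hcnt_def
  set gs : List Int := PySem.List.pyRange 9 (-1) (-1) with hgs
  -- basic facts
  have hFsmall : ∀ i : Int, 0 ≤ i → i < 2 → F i = [] := by
    intro i h0 h2
    rcases (by omega : i = 0 ∨ i = 1) with rfl | rfl
    · have h00 : digitsOf (0 : Int) = [] := by rw [digitsOf_unfold]; norm_num
      rw [hF]; dsimp only; rw [h00]; split_ifs <;> rfl
    · rw [hF]; dsimp only; rw [show is_prime 1 = false from rfl]; rfl
  have hpd_digits : ∀ a ∈ pd, 0 ≤ a ∧ a < 10 := by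
    intro a ha
    rw [hpd, List.mem_flatMap] at ha
    obtain ⟨i, _, hai⟩ := ha
    rw [hF] at hai; dsimp only at hai
    by_cases h : is_prime i
    · rw [if_pos h] at hai; exact mem_digitsOf hai
    · rw [if_neg h] at hai; simp at hai
  -- A's digit list is pd
  have hfold : (PySem.List.pyRange L (R + 1) 1).foldl
      (fun acc i => if is_prime i then acc ++ digitsOf i else acc) [] =
      (PySem.List.pyRange L (R + 1) 1).flatMap F := by
    have h1 : (PySem.List.pyRange L (R + 1) 1).foldl
        (fun acc i => if is_prime i then acc ++ digitsOf i else acc) [] =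
        (PySem.List.pyRange L (R + 1) 1).foldl (fun acc i => acc ++ F i) [] :=
      PySem.List.foldl_congr_mem _ _ _ _
        (fun acc x _ => by rw [hF]; dsimp only; by_cases h : is_prime x <;> simp [h])
    rw [h1, PySem.List.foldl_append_eq_flatMap]
    simp
  have hrange : (PySem.List.pyRange L (R + 1) 1).flatMap F = pd := by
    rw [hpd]
    by_cases hL2 : 2 ≤ L
    · rw [show lo = L from max_eq_left hL2]
    · have hlo' : lo = 2 := max_eq_right (by omega)
      by_cases hR : R + 1 ≤ 2
      · have e2 : (PySem.List.pyRange lo (R + 1) 1).flatMap F = [] := by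
          rw [PySem.List.pyRange_one_eq_nil (by omega)]
          simp
        have e1 : (PySem.List.pyRange L (R + 1) 1).flatMap F = [] := by
          rcases hpre with h0 | h0
          · apply List.flatMap_eq_nil_iff.mpr
            intro x hx
            rw [PySem.List.mem_pyRange_one] at hx
            exact hFsmall x (by omega) (by omega)
          · rw [PySem.List.pyRange_one_eq_nil (by omega)]
            simp
        rw [e1, e2]
      · have h0L : 0 ≤ L := by
          rcases hpre with h0 | h0
          · exact h0
          · omega
        rw [PySem.List.pyRange_one_append L 2 (R + 1) (by omega) (by omega),
          List.flatMap_append, hlo']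
        have hnil : (PySem.List.pyRange L 2 1).flatMap F = [] := by
          rw [List.flatMap_eq_nil_iff]
          intro x hx
          rw [PySem.List.mem_pyRange_one] at hx
          exact hFsmall x (by omega) (by omega)
        rw [hnil, List.nil_append]
  -- inside [lo, R+1) trial division and the sieve agree
  have hagree : ∀ p : Int, p ∈ PySem.List.pyRange lo (R + 1) 1 →
      is_prime p = !(composite.getD (p - lo).toNat false) := by
    intro p hp
    rw [PySem.List.mem_pyRange_one] at hp
    have hp2 : 2 ≤ p := by omega
    have hmem : composite.getD (p - lo).toNat false = true ↔ ¬ Nat.Prime p.toNat := by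
      rw [hcomp, hlo]
      exact flag_sieve_iff (by rw [hlo] at hp; omega) (by omega)
    by_cases hP : Nat.Prime p.toNat
    · have h1 : is_prime p = true := (is_prime_iff hp2).mpr hP
      have h2 : composite.getD (p - lo).toNat false = false := by
        rw [← Bool.not_eq_true, hmem]
        exact fun h => h hP
      rw [h1, h2]; rfl
    · have h1 : is_prime p = false := by
        rw [← Bool.not_eq_true]
        exact fun h => hP ((is_prime_iff hp2).mp h)
      have h2 : composite.getD (p - lo).toNat false = true := by
        rw [hmem]; exact hP
      rw [h1, h2]; rfl
  -- B's counts list counts pd's digits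
  have hcs := countsFold_spec (fun p => !(composite.getD (p - lo).toNat false))
      (PySem.List.pyRange lo (R + 1) 1) (List.replicate 10 (0 : Int))
      (by intro p hp; rw [PySem.List.mem_pyRange_one] at hp; omega)
      (List.length_replicate)
  have hflatB : ((PySem.List.pyRange lo (R + 1) 1).flatMap
      (fun p => if (!(composite.getD (p - lo).toNat false)) = true then digitsOf p else [])) = pd := by
    rw [hpd]
    apply flatMap_congr_mem
    intro x hx
    rw [hF]; dsimp only
    rw [hagree x hx]
  have hcounts_eq : ∀ g : Int, 0 ≤ g → g < 10 →
      PySem.List.pyGetD ((PySem.List.pyRange lo (R + 1) 1).foldl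
        (fun counts p => if ¬ (composite.getD (p - lo).toNat false) then bumpDigits p counts else counts)
        (List.replicate 10 (0 : Int))) g 0 = cnt g := by
    intro g hg0 hg10
    have hsame : (PySem.List.pyRange lo (R + 1) 1).foldl
        (fun counts p => if ¬ (composite.getD (p - lo).toNat false) then bumpDigits p counts else counts)
        (List.replicate 10 (0 : Int)) =
        (PySem.List.pyRange lo (R + 1) 1).foldl
        (fun counts p => if (!(composite.getD (p - lo).toNat false)) then bumpDigits p counts else counts)
        (List.replicate 10 (0 : Int)) :=
      PySem.List.foldl_congr_mem _ _ _ _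
        (fun acc x _ => by by_cases h : composite.getD (x - lo).toNat false = true <;> simp)
    rw [hsame, hcs.2 g hg0 hg10, hflatB]
    have hrep : PySem.List.pyGetD (List.replicate 10 (0 : Int)) g 0 = 0 := by
      rcases (by omega : g = 0 ∨ g = 1 ∨ g = 2 ∨ g = 3 ∨ g = 4 ∨ g = 5 ∨ g = 6 ∨ g = 7 ∨
        g = 8 ∨ g = 9) with rfl | rfl | rfl | rfl | rfl | rfl | rfl | rfl | rfl | rfl <;> rfl
    rw [hrep, hcnt_def]
    norm_num
  -- both final scans compute the same lexicographic argmax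
  have hgs_pw : gs.Pairwise (· > ·) := by rw [hgs]; decide
  have hgs_nd : gs.Nodup := by rw [hgs]; decide
  have hBfold : gs.foldl (bstep ((PySem.List.pyRange lo (R + 1) 1).foldl
        (fun counts p => if ¬ (composite.getD (p - lo).toNat false) then bumpDigits p counts else counts)
        (List.replicate 10 (0 : Int)))) (0, -1) =
      ((gs.filter (fun g => cnt g ≠ 0)).map (fun g => (g, cnt g))).foldl astep (0, -1) := by
    have h1 := PySem.List.foldl_congr_mem
      (l := gs) (init := ((0 : Int), (-1 : Int)))
      (f := bstep ((PySem.List.pyRange lo (R + 1) 1).foldl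
        (fun counts p => if ¬ (composite.getD (p - lo).toNat false) then bumpDigits p counts else counts)
        (List.replicate 10 (0 : Int))))
      (g := fun b g => if cnt g > b.1 then (cnt g, g) else b)
      (fun b g hg => by
        have hg' : -1 < g ∧ g ≤ 9 := by
          rw [hgs] at hg
          exact (PySem.List.mem_pyRange_neg_one).mp hg
        unfold bstep
        rw [hcounts_eq g (by omega) (by omega)])
    rw [h1]
    rw [fold_desc cnt (by intro g; rw [hcnt_def]; positivity) gs 0 (-1) (le_refl 0)
      (by intro h; omega) hgs_pw]
  have hperm : (PySem.Set.ofList pd).Perm (gs.filter (fun g => cnt g ≠ 0)) := by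
    rw [List.perm_ext_iff_of_nodup (PySem.Set.nodup_ofList pd) (hgs_nd.filter _)]
    intro a
    rw [PySem.Set.mem_ofList, List.mem_filter]
    constructor
    · intro ha
      refine ⟨?_, ?_⟩
      · have := hpd_digits a ha
        rw [hgs, PySem.List.mem_pyRange_neg_one]; omega
      · simp only [decide_eq_true_eq, hcnt_def]
        have : 0 < pd.count a := List.count_pos_iff.mpr ha
        intro hc
        omega
    · rintro ⟨_, hc⟩
      simp only [decide_eq_true_eq, hcnt_def] at hc
      have : 0 < pd.count a := by omega
      exact List.count_pos_iff.mp this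
  haveI hrc : RightCommutative astep := ⟨astep_rcomm⟩
  have hpermfold : ((PySem.Set.ofList pd).map (fun k => (k, cnt k))).foldl astep (0, -1) =
      ((gs.filter (fun g => cnt g ≠ 0)).map (fun g => (g, cnt g))).foldl astep (0, -1) :=
    (hperm.map _).foldl_eq (0, -1)
  -- assemble
  unfold highest_occurring_digit_in_primes highest_occurring_digit_in_primes_alt
  dsimp only
  rw [← hlo, ← hcomp, hfold, hrange, hBfold]
  by_cases hnil : pd = []
  · rw [if_pos hnil]
    have hfilter : gs.filter (fun g => cnt g ≠ 0) = [] := by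
      apply List.filter_eq_nil_iff.mpr
      intro g _
      simp [hcnt_def, hnil]
    rw [hfilter]
    rfl
  · rw [if_neg hnil]
    have hdict : pd.foldl
        (fun d dgt => if d.contains dgt then d.insert dgt (d.getD dgt 0 + 1) else d.insert dgt 1)
        (PySem.Dict.empty : PySem.Dict Int Int) = PySem.Dict.counter pd := by
      have h1 : pd.foldl
          (fun d dgt => if d.contains dgt then d.insert dgt (d.getD dgt 0 + 1) else d.insert dgt 1)
          (PySem.Dict.empty : PySem.Dict Int Int) = pd.foldl
          (fun d dgt => d.insert dgt (d.getD dgt 0 + 1))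
          (PySem.Dict.empty : PySem.Dict Int Int) :=
        PySem.List.foldl_congr_mem _ _ _ _
          (fun d x _ => by
            by_cases h : d.contains x = true
            · rw [if_pos h]
            · rw [if_neg h, PySem.Dict.getD_of_not_contains _ _ (by simpa using h)]
              norm_num)
      rw [h1]
      exact PySem.Dict.foldl_insert_getD_add_one_eq_counter pd
    rw [hdict, PySem.Dict.items_counter, ← hpermfold]

theorem highest_occurring_digit_in_primes_raises : Claim_raises_highest_occurring_digit_in_primes := by
  unfold Claim_raises_highest_occurring_digit_in_primes
  exact ⟨by intro L R _ hr; unfold Raises_highest_occurring_digit_in_primes at hr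
            unfold Pre_highest_occurring_digit_in_primes; omega,
         by decide⟩

-- self-check: at the crash witness (-5, 10), where A raises, B's port indeed returns 7
theorem highest_occurring_digit_in_primes_raises_ok :
    highest_occurring_digit_in_primes_alt (-5) 10 = 7 :=
  highest_occurring_digit_in_primes_raises.2.2.2
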